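-- pv_equiv track=rewrite | github.com/LokoInsanus/ABC | functions.py | propValor
-- ===== SOURCE A (Python) =====
-- def propValor(classificacao, individual):
--   propA = 0
--   propB = 0
--   propC = 0
--   for i in range(len(classificacao)):
--     if classificacao[i] == 'A':
--       propA += individual[i]
--     elif classificacao[i] == 'B':
--       propB += individual[i]
--     elif classificacao[i] == 'C':
--       propC += individual[i]
--   return propA, propB, propC
-- ===== SOURCE B (Python) =====
-- def propValor(classificacao, individual):
--   propA = sum(individual[i] for i in range(len(classificacao)) if classificacao[i] == 'A')
--   propB = sum(individual[i] for i in range(len(classificacao)) if classificacao[i] == 'B')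
--   propC = sum(individual[i] for i in range(len(classificacao)) if classificacao[i] == 'C')
--   return propA, propB, propC
-- ===== Notes on version B (the rewrite author's own statement) =====
-- stated objective: idiomatic
-- what changed: Replaces the single branching loop with three mutable accumulators by three independent filtered-sum comprehensions (one scan per class), using index access so IndexError behaviour is identical.
import Mathlib
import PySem

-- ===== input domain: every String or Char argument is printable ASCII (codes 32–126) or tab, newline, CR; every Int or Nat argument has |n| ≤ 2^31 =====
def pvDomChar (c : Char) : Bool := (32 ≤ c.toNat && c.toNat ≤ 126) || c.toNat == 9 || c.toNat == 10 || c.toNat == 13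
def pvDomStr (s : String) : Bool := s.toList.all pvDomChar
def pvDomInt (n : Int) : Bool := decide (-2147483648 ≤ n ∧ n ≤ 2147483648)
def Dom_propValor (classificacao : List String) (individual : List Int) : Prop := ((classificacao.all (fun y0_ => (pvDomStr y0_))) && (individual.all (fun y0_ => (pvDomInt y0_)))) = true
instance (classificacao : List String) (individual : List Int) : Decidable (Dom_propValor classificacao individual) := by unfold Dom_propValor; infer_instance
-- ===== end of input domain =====

-- B replaces A's single branching loop by three independent filtered sums (one scan per class); same values, idiomatic, not faster.
-- ===== PORT A =====
-- A: one pass over range(len(classificacao)) updating three accumulators (elif chain).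
-- individual[i] is in range on every admitted input (Pre_); getD 0 is exact there.
def propValor (classificacao : List String) (individual : List Int) : Int × Int × Int :=
  let r := (List.range classificacao.length).foldl
    (fun (s : Int × Int × Int) i =>
      if classificacao[i]?.getD "" == "A" then (s.1 + individual[i]?.getD 0, s.2.1, s.2.2)
      else if classificacao[i]?.getD "" == "B" then (s.1, s.2.1 + individual[i]?.getD 0, s.2.2)
      else if classificacao[i]?.getD "" == "C" then (s.1, s.2.1, s.2.2 + individual[i]?.getD 0)
      else s) (0, 0, 0)
  r

-- ===== PORT B =====
-- B: three independent filtered sums over the index range.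
def propValor_alt (classificacao : List String) (individual : List Int) : Int × Int × Int :=
  ( (((List.range classificacao.length).filter (fun i => classificacao[i]?.getD "" == "A")).map (fun i => individual[i]?.getD 0)).sum,
    (((List.range classificacao.length).filter (fun i => classificacao[i]?.getD "" == "B")).map (fun i => individual[i]?.getD 0)).sum,
    (((List.range classificacao.length).filter (fun i => classificacao[i]?.getD "" == "C")).map (fun i => individual[i]?.getD 0)).sum )

-- ===== PRECONDITION & SPEC =====
-- Pre_ excludes exactly the inputs where Python A (and Python B alike) raises IndexError:
-- some index whose class is 'A'/'B'/'C' lies beyond the end of individual.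
def Pre_propValor (classificacao : List String) (individual : List Int) : Prop :=
  ∀ i, i < classificacao.length →
    (classificacao[i]?.getD "" = "A" ∨ classificacao[i]?.getD "" = "B" ∨ classificacao[i]?.getD "" = "C") →
    i < individual.length
instance (classificacao : List String) (individual : List Int) : Decidable (Pre_propValor classificacao individual) := by unfold Pre_propValor; infer_instance
def pvWitness_propValor : List String × List Int := (["A", "B", "x", "C"], [1, 2, 3, 4])
def Spec_propValor (classificacao : List String) (individual : List Int) (out : Int × Int × Int) : Prop := out = propValor_alt classificacao individual
instance (classificacao : List String) (individual : List Int) (out : Int × Int × Int) : Decidable (Spec_propValor classificacao individual out) := by unfold Spec_propValor; infer_instance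

-- ===== CLAIM (what is proved, stated in full; the proofs are below) =====
def Claim_equal_propValor : Prop := ∀ (classificacao : List String) (individual : List Int), Dom_propValor classificacao individual → Pre_propValor classificacao individual → Spec_propValor classificacao individual (propValor classificacao individual)

-- ===== LEMMAS AND PROOFS =====
theorem propValor_fold_eq (cl : List String) (v : List Int) (l : List Nat) (a b c : Int) :
    l.foldl
      (fun (s : Int × Int × Int) i =>
        if cl[i]?.getD "" == "A" then (s.1 + v[i]?.getD 0, s.2.1, s.2.2)
        else if cl[i]?.getD "" == "B" then (s.1, s.2.1 + v[i]?.getD 0, s.2.2)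
        else if cl[i]?.getD "" == "C" then (s.1, s.2.1, s.2.2 + v[i]?.getD 0)
        else s) (a, b, c)
    = ( a + ((l.filter (fun i => cl[i]?.getD "" == "A")).map (fun i => v[i]?.getD 0)).sum,
        b + ((l.filter (fun i => cl[i]?.getD "" == "B")).map (fun i => v[i]?.getD 0)).sum,
        c + ((l.filter (fun i => cl[i]?.getD "" == "C")).map (fun i => v[i]?.getD 0)).sum ) := by
  induction l generalizing a b c with
  | nil => simp
  | cons x xs ih =>
    simp only [List.foldl_cons, List.filter_cons]
    simp at ih
    by_cases hA : cl[x]?.getD "" = "A"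
    · simp [hA, ih, add_assoc]
    · by_cases hB : cl[x]?.getD "" = "B"
      · simp [hB, ih, add_assoc]
      · by_cases hC : cl[x]?.getD "" = "C"
        · simp [hC, ih, add_assoc]
        · simp [hA, hB, hC, ih]

-- ===== VERDICT (by name: the statement is the Claim_ definition above) =====
theorem propValor_spec : Claim_equal_propValor := by
  intro classificacao individual _ _
  unfold Spec_propValor propValor propValor_alt
  rw [propValor_fold_eq]
  simp
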